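-- pv_equiv track=rewrite | github.com/alekFil/gradio | app/utils/utils.py | find_reels_fragments
-- ===== SOURCE A (Python) =====
-- def find_reels_fragments(labels, target_class, batch_size):
--     fragments = []
--
--     # Параметры для поиска последовательностей
--     start = None
--     count = 0
--
--     for i, label in enumerate(labels):
--         if label == target_class:
--             if start is None:
--                 start = i
--             count += 1
--         else:
--             if start is not None and count >= 1:
--                 # Определяем индекс среднего элемента
--                 middle_index = start + count // 2
--
--                 # Определяем, к какому батчу относится средний элемент
--                 batch_index = middle_index // batch_size
--
--                 # Определяем начало и конец соседних батчей
--                 start_batch = max(0, (batch_index - 1) * batch_size)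
--                 end_batch = min(len(labels) - 1, (batch_index + 2) * batch_size - 1)
--
--                 # Объединяем с предыдущим фрагментом, если они пересекаются
--                 if fragments and start_batch <= fragments[-1][1]:
--                     # Обновляем конец последнего фрагмента
--                     fragments[-1] = (fragments[-1][0], max(fragments[-1][1], end_batch))
--                 else:
--                     # Добавляем новый фрагмент
--                     fragments.append((start_batch, end_batch))
--
--             # Сброс параметров
--             start = None
--             count = 0
--
--     # Проверка для последней последовательности
--     if start is not None and count >= 3:
--         middle_index = start + count // 2
--         batch_index = middle_index // batch_size
--         start_batch = max(0, (batch_index - 1) * batch_size)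
--         end_batch = min(len(labels) - 1, (batch_index + 2) * batch_size - 1)
--
--         # Объединяем с предыдущим фрагментом, если они пересекаются
--         if fragments and start_batch <= fragments[-1][1]:
--             fragments[-1] = (fragments[-1][0], max(fragments[-1][1], end_batch))
--         else:
--             fragments.append((start_batch, end_batch))
--
--     return fragments
-- ===== SOURCE B (Python) =====
-- def find_reels_fragments(labels, target_class, batch_size):
--     # Pass 1: extract maximal runs of target_class as (start, count, terminal?)
--     runs = []
--     run_start = None
--     for i, label in enumerate(labels):
--         if label == target_class:
--             if run_start is None:
--                 run_start = i
--         elif run_start is not None: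
--             runs.append((run_start, i - run_start, False))
--             run_start = None
--     if run_start is not None:
--         runs.append((run_start, len(labels) - run_start, True))
--
--     # Pass 2: turn qualifying runs into batch-aligned intervals, merging overlaps
--     fragments = []
--     n = len(labels)
--     for start, count, terminal in runs:
--         if terminal and count < 3:
--             continue
--         middle_index = start + count // 2
--         batch_index = middle_index // batch_size
--         start_batch = max(0, (batch_index - 1) * batch_size)
--         end_batch = min(n - 1, (batch_index + 2) * batch_size - 1)
--         if fragments and start_batch <= fragments[-1][1]:
--             fragments[-1] = (fragments[-1][0], max(fragments[-1][1], end_batch))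
--         else:
--             fragments.append((start_batch, end_batch))
--     return fragments
-- ===== Notes on version B (the rewrite author's own statement) =====
-- stated objective: simpler
-- what changed: Replaces A's single interleaved scan (open-run state, merge logic inside the loop, and a duplicated tail block) by two clean passes: extract maximal target-class runs as (start, count, terminal) triples, then map each qualifying run (count>=1, or count>=3 for the terminal run) to its clamped batch interval and merge overlaps.
import Mathlib
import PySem

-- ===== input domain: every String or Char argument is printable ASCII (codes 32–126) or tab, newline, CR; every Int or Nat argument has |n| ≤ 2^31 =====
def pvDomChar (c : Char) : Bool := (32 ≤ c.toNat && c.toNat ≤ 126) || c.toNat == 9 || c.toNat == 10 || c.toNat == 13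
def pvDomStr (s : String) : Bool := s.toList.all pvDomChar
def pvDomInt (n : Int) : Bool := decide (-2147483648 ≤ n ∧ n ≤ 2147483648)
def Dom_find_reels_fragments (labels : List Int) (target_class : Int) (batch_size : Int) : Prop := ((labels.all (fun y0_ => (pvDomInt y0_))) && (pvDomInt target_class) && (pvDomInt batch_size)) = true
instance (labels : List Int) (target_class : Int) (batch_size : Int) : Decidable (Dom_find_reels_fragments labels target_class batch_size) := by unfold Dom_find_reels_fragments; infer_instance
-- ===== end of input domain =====

-- B replaces A's single interleaved scan (open-run state + duplicated tail block) by a clean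
-- two-pass decomposition: extract target-class runs first, then map qualifying runs to merged
-- batch intervals; same return value, objective: simpler.


-- ===== PORT A =====
-- the for-loop of A: state (fragments reversed-accumulator, start, count), index i
def pvLoopA (tc bs n : Int) : List Int → Int → List (Int × Int) → Option Int → Int → List (Int × Int) × Option Int × Int
  | [], _, frags, start, count => (frags, start, count)
  | label :: rest, i, frags, start, count =>
    if label = tc then
      pvLoopA tc bs n rest (i + 1) frags (match start with | none => some i | some s => some s) (count + 1)
    else
      let frags' :=
        match start with
        | some s =>
          if 1 ≤ count then
            let middle_index := s + PySem.Int.floordiv count 2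
            let batch_index := PySem.Int.floordiv middle_index bs
            let start_batch := max 0 ((batch_index - 1) * bs)
            let end_batch := min (n - 1) ((batch_index + 2) * bs - 1)
            match frags with
            | (a, b) :: t => if start_batch ≤ b then (a, max b end_batch) :: t else (start_batch, end_batch) :: (a, b) :: t
            | [] => [(start_batch, end_batch)]
          else frags
        | none => frags
      pvLoopA tc bs n rest (i + 1) frags' none 0

def find_reels_fragments (labels : List Int) (target_class : Int) (batch_size : Int) : List (Int × Int) :=
  let n : Int := labels.length
  match pvLoopA target_class batch_size n labels 0 [] none 0 with
  | (frags, start, count) =>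
    let frags2 :=
      match start with
      | some s =>
        if 3 ≤ count then
          let middle_index := s + PySem.Int.floordiv count 2
          let batch_index := PySem.Int.floordiv middle_index batch_size
          let start_batch := max 0 ((batch_index - 1) * batch_size)
          let end_batch := min (n - 1) ((batch_index + 2) * batch_size - 1)
          match frags with
          | (a, b) :: t => if start_batch ≤ b then (a, max b end_batch) :: t else (start_batch, end_batch) :: (a, b) :: t
          | [] => [(start_batch, end_batch)]
        else frags
      | none => frags
    frags2.reverse

-- ===== PORT B =====
-- pass 1 of Source B: maximal runs of target_class as (start, count, terminal?)
def pvRunsB (tc : Int) : List Int → Int → Option Int → List (Int × Int × Bool)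
  | [], i, run_start => match run_start with | none => [] | some s => [(s, i - s, true)]
  | label :: rest, i, run_start =>
    if label = tc then
      pvRunsB tc rest (i + 1) (match run_start with | none => some i | some s => some s)
    else
      match run_start with
      | none => pvRunsB tc rest (i + 1) none
      | some s => (s, i - s, false) :: pvRunsB tc rest (i + 1) none

-- interval for one run, merged into the (reversed) fragments accumulator
def pvEmitB (n bs : Int) (frags : List (Int × Int)) (start count : Int) : List (Int × Int) :=
  let middle_index := start + PySem.Int.floordiv count 2
  let batch_index := PySem.Int.floordiv middle_index bs
  let start_batch := max 0 ((batch_index - 1) * bs)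
  let end_batch := min (n - 1) ((batch_index + 2) * bs - 1)
  match frags with
  | (a, b) :: t => if start_batch ≤ b then (a, max b end_batch) :: t else (start_batch, end_batch) :: (a, b) :: t
  | [] => [(start_batch, end_batch)]

-- pass 2 of Source B
def pvProcB (n bs : Int) : List (Int × Int × Bool) → List (Int × Int) → List (Int × Int)
  | [], frags => frags
  | (s, c, term) :: rest, frags =>
    if term = true ∧ c < 3 then pvProcB n bs rest frags
    else pvProcB n bs rest (pvEmitB n bs frags s c)

def find_reels_fragments_alt (labels : List Int) (target_class : Int) (batch_size : Int) : List (Int × Int) :=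
  let n : Int := labels.length
  (pvProcB n batch_size (pvRunsB target_class labels 0 none) []).reverse

-- ===== PRECONDITION & SPEC =====
-- Pre_ excludes exactly the inputs where Python A raises ZeroDivisionError: batch_size = 0 together
-- with a run that gets processed (a target_class element followed later by a non-target element, or
-- a terminal run of length ≥ 3).
def Pre_find_reels_fragments (labels : List Int) (target_class : Int) (batch_size : Int) : Prop :=
  batch_size ≠ 0 ∨
    ((labels.dropWhile (fun l => l ≠ target_class)).all (fun l => l == target_class) = true ∧
     ¬(3 ≤ labels.length ∧ (labels.drop (labels.length - 3)).all (fun l => l == target_class) = true))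
instance (labels : List Int) (target_class : Int) (batch_size : Int) : Decidable (Pre_find_reels_fragments labels target_class batch_size) := by unfold Pre_find_reels_fragments; infer_instance

def pvWitness_find_reels_fragments : List Int × Int × Int := ([0, 1, 1, 0, 2, 1], 1, 2)

def Spec_find_reels_fragments (labels : List Int) (target_class : Int) (batch_size : Int) (out : List (Int × Int)) : Prop := out = find_reels_fragments_alt labels target_class batch_size
instance (labels : List Int) (target_class : Int) (batch_size : Int) (out : List (Int × Int)) : Decidable (Spec_find_reels_fragments labels target_class batch_size out) := by unfold Spec_find_reels_fragments; infer_instance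

-- ===== CLAIM (what is proved, stated in full; the proofs are below) =====
def Claim_equal_find_reels_fragments : Prop := ∀ (labels : List Int) (target_class : Int) (batch_size : Int), Dom_find_reels_fragments labels target_class batch_size → Pre_find_reels_fragments labels target_class batch_size → Spec_find_reels_fragments labels target_class batch_size (find_reels_fragments labels target_class batch_size)

-- ===== LEMMAS AND PROOFS =====

-- A's tail block (after the loop), factored for the proof only
def pvFinishA (bs n : Int) : List (Int × Int) × Option Int × Int → List (Int × Int)
  | (frags, start, count) =>
    match start with
    | some s =>
      if 3 ≤ count then
        let middle_index := s + PySem.Int.floordiv count 2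
        let batch_index := PySem.Int.floordiv middle_index bs
        let start_batch := max 0 ((batch_index - 1) * bs)
        let end_batch := min (n - 1) ((batch_index + 2) * bs - 1)
        match frags with
        | (a, b) :: t => if start_batch ≤ b then (a, max b end_batch) :: t else (start_batch, end_batch) :: (a, b) :: t
        | [] => [(start_batch, end_batch)]
      else frags
    | none => frags

-- Invariant-carrying equivalence of A's loop+tail with B's two passes
lemma pv_loop_eq (tc bs n : Int) :
    ∀ (ls : List Int) (i : Int) (frags : List (Int × Int)) (rs : Option Int) (count : Int),
      (rs = none → count = 0) →
      (∀ s, rs = some s → count = i - s ∧ 1 ≤ count) →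
      pvFinishA bs n (pvLoopA tc bs n ls i frags rs count)
        = pvProcB n bs (pvRunsB tc ls i rs) frags := by
  intro ls
  induction ls with
  | nil =>
    intro i frags rs count h0 h1
    cases rs with
    | none => simp [pvLoopA, pvRunsB, pvProcB, pvFinishA]
    | some s =>
      obtain ⟨hc, hc1⟩ := h1 s rfl
      by_cases h3 : 3 ≤ count
      · have h3' : ¬ count < 3 := by omega
        simp only [pvLoopA, pvRunsB, pvProcB, pvFinishA, ← hc, if_pos h3]
        rw [if_neg (by simp [h3'])]
        simp only [pvEmitB]
      · have h3' : count < 3 := by omega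
        simp only [pvLoopA, pvRunsB, pvProcB, pvFinishA, ← hc, if_neg h3]
        rw [if_pos (by simp [h3'])]
  | cons label rest ih =>
    intro i frags rs count h0 h1
    by_cases hl : label = tc
    · cases rs with
      | none =>
        have hc0 := h0 rfl
        simp only [pvLoopA, pvRunsB, hl]
        exact ih (i + 1) frags (some i) (count + 1) (by simp) (by intro s hs; cases hs; omega)
      | some s =>
        obtain ⟨hc, hc1⟩ := h1 s rfl
        simp only [pvLoopA, pvRunsB, hl]
        exact ih (i + 1) frags (some s) (count + 1) (by simp) (by intro t ht; cases ht; omega)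
    · cases rs with
      | none =>
        simp only [pvLoopA, pvRunsB, hl]
        exact ih (i + 1) frags none 0 (fun _ => rfl) (by intro s hs; cases hs)
      | some s =>
        obtain ⟨hc, hc1⟩ := h1 s rfl
        simp only [pvLoopA, pvRunsB, hl]
        rw [if_neg (by simp)]
        have : pvEmitB n bs frags s (i - s)
            = (if 1 ≤ count then
                let middle_index := s + PySem.Int.floordiv count 2
                let batch_index := PySem.Int.floordiv middle_index bs
                let start_batch := max 0 ((batch_index - 1) * bs)
                let end_batch := min (n - 1) ((batch_index + 2) * bs - 1)
                match frags with
                | (a, b) :: t => if start_batch ≤ b then (a, max b end_batch) :: t else (start_batch, end_batch) :: (a, b) :: t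
                | [] => [(start_batch, end_batch)]
              else frags) := by
          rw [if_pos hc1, ← hc]; rfl
        rw [← this]
        exact ih (i + 1) (pvEmitB n bs frags s (i - s)) none 0 (fun _ => rfl) (by intro t ht; cases ht)

lemma pv_find_eq (labels : List Int) (tc bs : Int) :
    find_reels_fragments labels tc bs
      = (pvFinishA bs labels.length (pvLoopA tc bs labels.length labels 0 [] none 0)).reverse := by
  simp only [find_reels_fragments]
  rcases h : pvLoopA tc bs (labels.length : Int) labels 0 [] none 0 with ⟨frags, start, count⟩
  simp only [pvFinishA]

-- ===== VERDICT (by name: the statement is the Claim_ definition above) =====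
theorem find_reels_fragments_spec : Claim_equal_find_reels_fragments := by
  intro labels tc bs _ _
  unfold Spec_find_reels_fragments find_reels_fragments_alt
  rw [pv_find_eq,
      pv_loop_eq tc bs labels.length labels 0 [] none 0 (fun _ => rfl) (by intro s hs; cases hs)]
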